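-- pv_equiv track=rewrite | github.com/pisterlabs/promptset | data/scraping-2.0/repos/redwoodresearch~Text-Steganography-Benchmark/textsteg~attackers~instruction_attackers.py | extract_ways
-- ===== SOURCE A (Python) =====
-- def extract_ways(answer: str):
--     lines = answer.split("\n")
--     ways = []
--     for line in lines:
--         if line.startswith("### Answer"):
--             ways.append([])
--         elif ways:
--             ways[-1].append(line)
--     return ["\n".join(way) for way in ways] if ways else [answer]
-- ===== SOURCE B (Python) =====
-- def extract_ways(answer: str):
--     lines = answer.split("\n")
--     starts = [i for i, line in enumerate(lines) if line.startswith("### Answer")]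
--     if not starts:
--         return [answer]
--     bounds = starts + [len(lines)]
--     return ["\n".join(lines[s + 1 : e]) for s, e in zip(bounds, bounds[1:])]
-- ===== Notes on version B (the rewrite author's own statement) =====
-- stated objective: alternative
-- what changed: Replaces A's single stateful loop that appends lines into ways[-1] with an index-then-slice pass: first collect the indices of the header lines, then emit one joined slice per consecutive pair of boundaries (with the line count as sentinel).
import Mathlib
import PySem

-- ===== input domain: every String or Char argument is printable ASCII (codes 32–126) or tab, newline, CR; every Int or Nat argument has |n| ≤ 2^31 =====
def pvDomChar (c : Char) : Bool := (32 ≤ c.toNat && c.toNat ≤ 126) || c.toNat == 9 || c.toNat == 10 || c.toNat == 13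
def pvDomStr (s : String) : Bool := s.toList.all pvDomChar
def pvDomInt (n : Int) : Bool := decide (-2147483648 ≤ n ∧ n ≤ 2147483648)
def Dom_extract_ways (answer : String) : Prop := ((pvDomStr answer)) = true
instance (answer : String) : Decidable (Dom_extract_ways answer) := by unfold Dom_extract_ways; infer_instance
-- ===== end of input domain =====

-- B replaces A's stateful accumulate-into-ways[-1] loop by an index-then-slice pass (same return value; alternative decomposition, not claimed faster).

-- ===== PORT A =====
-- shared helper: the Python expression line.startswith("### Answer"), used by both sources
def pvHdr (line : String) : Bool := PySem.Str.startswith line "### Answer"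

def extract_ways (answer : String) : List String :=
  let lines := (PySem.Str.split? answer "\n").getD []
  let ways := lines.foldl
    (fun ways line =>
      if pvHdr line then ways ++ [([] : List String)]
      else if ways.isEmpty then ways
      else ways.dropLast ++ [PySem.List.pyGetD ways (-1) [] ++ [line]])
    ([] : List (List String))
  if ways.isEmpty then [answer] else ways.map (fun way => PySem.Str.join "\n" way)

-- ===== PORT B =====
def extract_ways_alt (answer : String) : List String :=
  let lines := (PySem.Str.split? answer "\n").getD []
  let starts := ((PySem.List.enumerate lines).filter (fun p => pvHdr p.2)).map (fun p => p.1)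
  if starts.isEmpty then [answer]
  else
    let bounds := starts ++ [(lines.length : Int)]
    (bounds.zip bounds.tail).map
      (fun p => PySem.Str.join "\n" (PySem.List.slice lines (some (p.1 + 1)) (some p.2)))

-- ===== PRECONDITION & SPEC =====
def Spec_extract_ways (answer : String) (out : List String) : Prop := out = extract_ways_alt answer
instance (answer : String) (out : List String) : Decidable (Spec_extract_ways answer out) := by unfold Spec_extract_ways; infer_instance

-- ===== CLAIM (what is proved, stated in full; the proofs are below) =====
def Claim_equal_extract_ways : Prop := ∀ (answer : String), Dom_extract_ways answer → Spec_extract_ways answer (extract_ways answer)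

-- ===== LEMMAS AND PROOFS =====

-- the grouping both programs compute, stated structurally
def pvGrp : List String → List (List String)
  | [] => []
  | l :: ls =>
    if pvHdr l then ls.takeWhile (fun x => !pvHdr x) :: pvGrp (ls.dropWhile (fun x => !pvHdr x))
    else pvGrp ls
termination_by ls => ls.length
decreasing_by
  · exact Nat.lt_succ_of_le (List.length_dropWhile_le _ _)
  · exact Nat.lt_succ_self _

-- header positions (Nat indices)
def pvHpos : List String → List Nat
  | [] => []
  | l :: ls => if pvHdr l then 0 :: (pvHpos ls).map (· + 1) else (pvHpos ls).map (· + 1)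

-- B's slicing pass, at the Nat level
def pvGslices (ls : List String) : List (List String) :=
  let B := pvHpos ls ++ [ls.length]
  (B.zip B.tail).map (fun p => (ls.drop (p.1 + 1)).take (p.2 - (p.1 + 1)))

lemma pv_foldA_nonempty (ls : List String) (ws : List (List String)) (cur : List String) :
    ls.foldl
      (fun ways line =>
        if pvHdr line then ways ++ [([] : List String)]
        else if ways.isEmpty then ways
        else ways.dropLast ++ [PySem.List.pyGetD ways (-1) [] ++ [line]])
      (ws ++ [cur])
    = ws ++ (cur ++ ls.takeWhile (fun x => !pvHdr x)) :: pvGrp (ls.dropWhile (fun x => !pvHdr x)) := by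
  induction ls generalizing ws cur with
  | nil => simp [pvGrp]
  | cons l ls ih =>
    by_cases h : pvHdr l
    · simp only [List.foldl_cons, h, if_true]
      rw [ih (ws ++ [cur]) []]
      simp [pvGrp, h]
    · simp only [List.foldl_cons, h, if_false, Bool.false_eq_true]
      have hne : (ws ++ [cur]).isEmpty = false := by simp
      rw [hne]
      simp only [Bool.false_eq_true, if_false, List.dropLast_concat,
        PySem.List.pyGetD_neg_one_append_singleton]
      rw [ih ws (cur ++ [l])]
      simp [h]

lemma pv_foldA_single (ls : List String) (cur : List String) :
    ls.foldl
      (fun ways line =>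
        if pvHdr line then ways ++ [([] : List String)]
        else if ways.isEmpty then ways
        else ways.dropLast ++ [PySem.List.pyGetD ways (-1) [] ++ [line]])
      [cur]
    = (cur ++ ls.takeWhile (fun x => !pvHdr x)) :: pvGrp (ls.dropWhile (fun x => !pvHdr x)) := by
  have := pv_foldA_nonempty ls [] cur
  simpa using this

lemma pv_foldA_nil (ls : List String) :
    ls.foldl
      (fun ways line =>
        if pvHdr line then ways ++ [([] : List String)]
        else if ways.isEmpty then ways
        else ways.dropLast ++ [PySem.List.pyGetD ways (-1) [] ++ [line]])
      [] = pvGrp ls := by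
  induction ls with
  | nil => simp [pvGrp]
  | cons l ls ih =>
    by_cases h : pvHdr l
    · simp only [List.foldl_cons, h, if_true, List.nil_append]
      rw [pv_foldA_single ls []]
      simp [pvGrp, h]
    · simp only [List.foldl_cons, h, Bool.false_eq_true, if_false, List.isEmpty_nil, if_true, ih]
      simp [pvGrp, h]

lemma pvGrp_eq_nil_iff (ls : List String) : pvGrp ls = [] ↔ pvHpos ls = [] := by
  induction ls with
  | nil => simp [pvGrp, pvHpos]
  | cons l ls ih =>
    by_cases h : pvHdr l <;> simp [pvGrp, pvHpos, h, ih]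

lemma pvStarts (ls : List String) (k : Int) :
    ((PySem.List.enumerate ls k).filter (fun p => pvHdr p.2)).map (fun p => p.1)
      = (pvHpos ls).map (fun n : Nat => k + (n : Int)) := by
  induction ls generalizing k with
  | nil => simp [PySem.List.enumerate_nil, pvHpos]
  | cons l ls ih =>
    rw [PySem.List.enumerate_cons]
    by_cases h : pvHdr l
    · simp only [List.filter_cons, h, if_true, List.map_cons]
      rw [ih (k + 1)]
      simp only [pvHpos, h, if_true, List.map_cons, List.map_map, Function.comp_def]
      refine List.cons_eq_cons.mpr ⟨by push_cast; ring, ?_⟩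
      refine List.map_congr_left fun n _ => by push_cast; ring
    · simp only [List.filter_cons, h, Bool.false_eq_true, if_false]
      rw [ih (k + 1)]
      simp only [pvHpos, h, Bool.false_eq_true, if_false, List.map_map, Function.comp_def]
      refine List.map_congr_left fun n _ => by push_cast; ring

lemma pv_take_headD (ls : List String) :
    ls.take ((pvHpos ls).headD ls.length) = ls.takeWhile (fun x => !pvHdr x) := by
  induction ls with
  | nil => simp
  | cons l ls ih =>
    by_cases h : pvHdr l
    · simp [pvHpos, h]
    · cases hh : pvHpos ls with
      | nil => simp [pvHpos, h, hh, ← ih]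
      | cons a t => simp [pvHpos, h, hh, ← ih]

lemma pv_drop_headD (ls : List String) :
    ls.drop ((pvHpos ls).headD ls.length) = ls.dropWhile (fun x => !pvHdr x) := by
  induction ls with
  | nil => simp
  | cons l ls ih =>
    by_cases h : pvHdr l
    · simp [pvHpos, h]
    · cases hh : pvHpos ls with
      | nil => simp [pvHpos, h, hh, ← ih]
      | cons a t => simp [pvHpos, h, hh, ← ih]

lemma pvGrp_dropWhile (ls : List String) :
    pvGrp (ls.dropWhile (fun x => !pvHdr x)) = pvGrp ls := by
  induction ls with
  | nil => simp
  | cons l ls ih =>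
    by_cases h : pvHdr l
    · simp [h]
    · simp [h, ih, pvGrp]

-- prepending a line shifts every boundary pair by one and leaves the slices unchanged
lemma pv_shift (xs : List String) (l : String) (B : List Nat) :
    (((B.map (· + 1)).zip (B.map (· + 1)).tail).map
        (fun p => ((l :: xs).drop (p.1 + 1)).take (p.2 - (p.1 + 1))))
      = ((B.zip B.tail).map (fun p => (xs.drop (p.1 + 1)).take (p.2 - (p.1 + 1)))) := by
  rw [← List.map_tail, List.zip_map, List.map_map]
  refine List.map_congr_left fun p _ => ?_
  obtain ⟨a, b⟩ := p
  simp only [Function.comp_apply, Prod.map_apply, List.drop_succ_cons]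
  have : b + 1 - (a + 1 + 1) = b - (a + 1) := by omega
  rw [this]

lemma pvGslices_eq_grp (ls : List String) (h : pvHpos ls ≠ []) : pvGslices ls = pvGrp ls := by
  induction ls with
  | nil => simp [pvHpos] at h
  | cons l ls ih =>
    by_cases hl : pvHdr l
    · have hB : pvHpos (l :: ls) ++ [(l :: ls).length]
          = 0 :: ((pvHpos ls ++ [ls.length]).map (· + 1)) := by
        simp [pvHpos, hl, List.map_append]
      have hBne : ∃ b0 bt, (pvHpos ls ++ [ls.length]).map (· + 1) = b0 :: bt := by
        cases hx : (pvHpos ls ++ [ls.length]).map (· + 1) with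
        | nil => simp at hx
        | cons a t => exact ⟨a, t, rfl⟩
      obtain ⟨b0, bt, hbt⟩ := hBne
      have hhead : b0 = ((pvHpos ls).headD ls.length) + 1 := by
        cases hh : pvHpos ls with
        | nil => simp [hh] at hbt; simp [hbt.1.symm]
        | cons a t => simp [hh] at hbt; simp [hbt.1.symm]
      unfold pvGslices
      simp only [hB, hbt, List.tail_cons]
      rw [List.zip_cons_cons]
      simp only [List.map_cons]
      have hz : ((b0 :: bt).zip bt)
          = (((pvHpos ls ++ [ls.length]).map (· + 1)).zip
             ((pvHpos ls ++ [ls.length]).map (· + 1)).tail) := by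
        rw [hbt, List.tail_cons]
      rw [hz, pv_shift]
      have hfirst : ((l :: ls).drop (0 + 1)).take (b0 - (0 + 1))
          = ls.takeWhile (fun x => !pvHdr x) := by
        simp [hhead, ← pv_take_headD]
      rw [hfirst]
      by_cases hls : pvHpos ls = []
      · have : (pvHpos ls ++ [ls.length]).zip (pvHpos ls ++ [ls.length]).tail = [] := by
          simp [hls]
        rw [this]
        have hdw : ls.dropWhile (fun x => !pvHdr x) = [] := by
          rw [← pv_drop_headD]; simp [hls]
        simp [pvGrp, hl, hdw]
      · have := ih hls
        unfold pvGslices at this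
        simp only at this
        rw [this]
        simp [pvGrp, hl, pvGrp_dropWhile]
    · have hls : pvHpos ls ≠ [] := by
        intro hx; apply h; simp [pvHpos, hl, hx]
      have hB : pvHpos (l :: ls) ++ [(l :: ls).length]
          = (pvHpos ls ++ [ls.length]).map (· + 1) := by
        simp [pvHpos, hl, List.map_append]
      unfold pvGslices
      simp only [hB]
      rw [pv_shift]
      have := ih hls
      unfold pvGslices at this
      simp only at this
      rw [this]
      simp [pvGrp, hl]

-- ===== VERDICT (by name: the statement is the Claim_ definition above) =====
theorem extract_ways_spec : Claim_equal_extract_ways := by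
  intro answer _
  unfold Spec_extract_ways extract_ways extract_ways_alt
  simp only []
  set lines := (PySem.Str.split? answer "\n").getD [] with hlines
  rw [pv_foldA_nil lines]
  rw [pvStarts lines 0]
  simp only [zero_add]
  by_cases h : pvHpos lines = []
  · simp [h, (pvGrp_eq_nil_iff lines).2 h]
  · have hg : pvGrp lines ≠ [] := fun hx => h ((pvGrp_eq_nil_iff lines).1 hx)
    have hgIsE : (pvGrp lines).isEmpty = false := by
      simp [hg]
    have hsIsE : ((pvHpos lines).map (fun n : Nat => (n : Int))).isEmpty = false := by
      simp [h]
    rw [hgIsE, hsIsE]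
    simp only [Bool.false_eq_true, if_false]
    have hbounds : ((pvHpos lines).map (fun n : Nat => (n : Int))) ++ [(lines.length : Int)]
        = (pvHpos lines ++ [lines.length]).map (fun n : Nat => (n : Int)) := by
      simp [List.map_append]
    rw [hbounds, ← List.map_tail, List.zip_map, List.map_map]
    simp only [Function.comp_def]
    rw [← pvGslices_eq_grp lines h]
    unfold pvGslices
    simp only [List.map_map, Function.comp_def]
    refine List.map_congr_left fun p hp => ?_
    obtain ⟨a, b⟩ := p
    simp only [Prod.map_apply]
    have hc : ((a : Int) + 1) = ((a + 1 : Nat) : Int) := by push_cast; ring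
    rw [hc, PySem.List.slice_natCast]
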